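-- pv_equiv track=rewrite | github.com/cphan98/IFT1015-minesweeper | demineur.py | cellulesParRangeeHTML
-- ===== SOURCE A (Python) =====
-- def cellulesHTML(largeur, hauteur):
--
--     # La fonction cellulesHTML prend comme paramètre deux entiers positifs et
--     # retourne un tableau de texte contenant toutes les cellules HTML du
--     # tableau du démineur. Chaque cellule contient une image d'une tuile vide.
--
--     cellules = []
--     nbCellules = largeur * hauteur
--
--     for i in range(nbCellules):
--         cellules.append('<td id="tuile' + str(i) +
--                         '" onclick="clic("tuile' + str(i) + '")"><img src="http://codeboot.org/images/minesweeper/blank.png"></td>')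
--
--     return cellules
--
-- def cellulesParRangeeHTML(largeur, hauteur):
--
--     # La fonction cellulesParRangeeHTML prend comme paramètres deux entiers
--     # positif et retourne un tableau de texte contenant les cellules HTML
--     # pour chaque rangée du tableau du démineur.
--
--     cellules = cellulesHTML(largeur, hauteur)
--     rangees = []
--
--     for _ in range(hauteur):
--         if len(cellules) == largeur:
--             rangees.append(''.join(cellules[0:]))
--         elif len(cellules) == 0:
--             return rangees
--         else:
--             rangees.append(''.join(cellules[0:largeur]))
--             for _ in range(largeur):
--                 cellules.pop(0)
--
--         if rangees[-1] == '':
--             rangees.pop()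
--
--     return rangees
-- ===== SOURCE B (Python) =====
-- def cellulesParRangeeHTML(largeur, hauteur):
--     # Direct row-major construction: one row string per r, cell index i = r*largeur + c.
--     if largeur <= 0 or hauteur <= 0:
--         return []
--     def cellule(i):
--         return ('<td id="tuile' + str(i) + '" onclick="clic("tuile' + str(i) +
--                 '")"><img src="http://codeboot.org/images/minesweeper/blank.png"></td>')
--     return [''.join(cellule(r * largeur + c) for c in range(largeur))
--             for r in range(hauteur)]
-- ===== Notes on version B (the rewrite author's own statement) =====
-- stated objective: simpler
-- what changed: B computes each row directly from the row-major index formula i = r*largeur + c and joins it in place, instead of A's building one flat cell list and regrouping it into rows by slicing and repeated pop(0); the degenerate cases fall out of a single non-positive-size check instead of A's empty-row append-then-pop dance.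
import Mathlib
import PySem

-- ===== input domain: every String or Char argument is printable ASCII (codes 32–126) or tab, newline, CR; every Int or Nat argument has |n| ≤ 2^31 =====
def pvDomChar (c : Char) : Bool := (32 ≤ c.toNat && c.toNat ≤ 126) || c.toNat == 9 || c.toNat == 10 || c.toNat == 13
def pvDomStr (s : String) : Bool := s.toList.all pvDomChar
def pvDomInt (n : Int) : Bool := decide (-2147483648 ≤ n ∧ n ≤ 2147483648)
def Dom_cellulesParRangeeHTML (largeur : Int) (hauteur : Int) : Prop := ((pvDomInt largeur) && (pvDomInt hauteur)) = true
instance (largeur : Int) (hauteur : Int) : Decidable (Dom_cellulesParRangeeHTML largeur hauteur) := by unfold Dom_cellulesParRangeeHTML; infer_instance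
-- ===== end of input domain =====

-- B builds each HTML row directly from the row-major index r*largeur+c instead of
-- grouping a flat cell list by repeated pop(0); objective: simpler (and avoids quadratic popping).

-- ===== PORT A =====
-- the cell string for index i (A's append body)
def pvCellA (i : Int) : String :=
  "<td id=\"tuile" ++ PySem.Int.toStr i ++
    "\" onclick=\"clic(\"tuile" ++ PySem.Int.toStr i ++ "\")\"><img src=\"http://codeboot.org/images/minesweeper/blank.png\"></td>"

-- cellulesHTML: for i in range(largeur*hauteur): cellules.append(...)
def pvCellulesHTML (largeur : Int) (hauteur : Int) : List String :=
  (PySem.List.pyRange 0 (largeur * hauteur) 1).foldl (fun acc i => acc ++ [pvCellA i]) []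

-- 'if rangees[-1] == "": rangees.pop()'
def pvPopEmpty (r : List String) : List String :=
  if PySem.List.pyGet? r (-1) = some "" then r.dropLast else r

-- the 'for _ in range(hauteur)' loop, fuel = number of remaining iterations;
-- returning rangees directly models A's early 'return rangees'.
def pvLoopA (largeur : Int) : Nat → List String → List String → List String
  | 0, _, rangees => rangees
  | n+1, cellules, rangees =>
    if ((cellules.length : Int) = largeur) then
      pvLoopA largeur n cellules
        (pvPopEmpty (rangees ++ [PySem.Str.join "" (PySem.List.slice cellules (some 0) none)]))
    else if cellules.length = 0 then rangees
    else
      -- for _ in range(largeur): cellules.pop(0)   (pop(0) = tail; the list is never empty where A returns)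
      pvLoopA largeur n
        ((PySem.List.pyRange 0 largeur 1).foldl (fun cs _ => cs.tail) cellules)
        (pvPopEmpty (rangees ++ [PySem.Str.join "" (PySem.List.slice cellules (some 0) (some largeur))]))

def cellulesParRangeeHTML (largeur : Int) (hauteur : Int) : List String :=
  pvLoopA largeur hauteur.toNat (pvCellulesHTML largeur hauteur) []

-- ===== PORT B =====
def pvCellB (i : Int) : String :=
  "<td id=\"tuile" ++ PySem.Int.toStr i ++
    "\" onclick=\"clic(\"tuile" ++ PySem.Int.toStr i ++ "\")\"><img src=\"http://codeboot.org/images/minesweeper/blank.png\"></td>"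

def cellulesParRangeeHTML_alt (largeur : Int) (hauteur : Int) : List String :=
  if largeur ≤ 0 ∨ hauteur ≤ 0 then []
  else
    (PySem.List.pyRange 0 hauteur 1).map (fun r =>
      PySem.Str.join "" ((PySem.List.pyRange 0 largeur 1).map (fun c => pvCellB (r * largeur + c))))

-- ===== PRECONDITION & SPEC =====
def Spec_cellulesParRangeeHTML (largeur : Int) (hauteur : Int) (out : List String) : Prop := out = cellulesParRangeeHTML_alt largeur hauteur
instance (largeur : Int) (hauteur : Int) (out : List String) : Decidable (Spec_cellulesParRangeeHTML largeur hauteur out) := by unfold Spec_cellulesParRangeeHTML; infer_instance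

-- ===== CLAIM (what is proved, stated in full; the proofs are below) =====
def Claim_equal_cellulesParRangeeHTML : Prop := ∀ (largeur : Int) (hauteur : Int), Dom_cellulesParRangeeHTML largeur hauteur → Spec_cellulesParRangeeHTML largeur hauteur (cellulesParRangeeHTML largeur hauteur)

-- ===== LEMMAS AND PROOFS =====

-- the cells of one row starting at flat index s
def pvRowCells (largeur s : Int) : List String :=
  (List.range largeur.toNat).map (fun (j : Nat) => pvCellA (s + (j : Int)))

-- the flat cell list of h rows starting at flat index s, grouped by rows
def pvCellsB (largeur : Int) : Nat → Int → List String
  | 0, _ => []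
  | h+1, s => pvRowCells largeur s ++ pvCellsB largeur h (s + largeur)

lemma pvCellB_eq : pvCellB = pvCellA := rfl

lemma foldl_append_map (f : Int → String) (xs : List Int) (acc : List String) :
    xs.foldl (fun a i => a ++ [f i]) acc = acc ++ xs.map f := by
  induction xs generalizing acc with
  | nil => simp
  | cons x xs ih => simp [List.foldl, ih]

lemma foldl_tail_drop {α β : Type} (l : List β) (cs : List α) :
    l.foldl (fun cs _ => cs.tail) cs = cs.drop l.length := by
  induction l generalizing cs with
  | nil => simp
  | cons x l ih => simp [List.foldl, ih]

lemma length_pvRowCells (L s : Int) : (pvRowCells L s).length = L.toNat := by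
  simp [pvRowCells]

lemma length_pvCellsB (L : Int) : ∀ (h : Nat) (s : Int), (pvCellsB L h s).length = L.toNat * h
  | 0, s => by simp [pvCellsB]
  | h+1, s => by
    rw [pvCellsB, List.length_append, length_pvRowCells, length_pvCellsB L h (s + L)]
    ring

lemma blockEq (L : Int) (hL : 0 ≤ L) : ∀ (h : Nat) (s : Int),
    (List.range (L.toNat * h)).map (fun (k : Nat) => pvCellA (s + (k : Int))) = pvCellsB L h s
  | 0, s => by simp [pvCellsB]
  | h+1, s => by
    have e : L.toNat * (h+1) = L.toNat + L.toNat * h := by ring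
    rw [e, List.range_add, List.map_append, List.map_map]
    rw [pvCellsB]
    congr 1
    rw [← blockEq L hL h (s + L)]
    apply List.map_congr_left
    intro k _
    simp only [Function.comp]
    congr 1
    have hc : ((L.toNat : Int)) = L := Int.toNat_of_nonneg hL
    push_cast
    omega

lemma join_cell_ne (i : Int) (rest : List String) :
    PySem.Str.join "" (pvCellA i :: rest) ≠ "" := by
  intro h
  apply_fun String.toList at h
  simp [PySem.Str.join, pvCellA] at h
  cases rest with
  | nil => simp [PySem.Chars.join_singleton] at h
  | cons y ys => simp [PySem.Chars.join_cons_cons] at h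

lemma join_rowCells_ne (L s : Int) (hL : 0 < L) :
    PySem.Str.join "" (pvRowCells L s) ≠ "" := by
  obtain ⟨n, hn⟩ : ∃ n, L.toNat = n + 1 := ⟨L.toNat - 1, by omega⟩
  rw [pvRowCells, hn, List.range_succ_eq_map, List.map_cons]
  exact join_cell_ne _ _

lemma popEmpty_ne (r : List String) (row : String) (h : row ≠ "") :
    pvPopEmpty (r ++ [row]) = r ++ [row] := by
  rw [pvPopEmpty, if_neg]
  rw [PySem.List.pyGet?_neg_one_append_singleton]
  simpa using h

lemma rows_shift (L s : Int) (h : Nat) :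
    (List.range (h+2)).map (fun (r : Nat) => PySem.Str.join "" (pvRowCells L (s + L * r)))
      = PySem.Str.join "" (pvRowCells L s)
        :: (List.range (h+1)).map (fun (r : Nat) => PySem.Str.join "" (pvRowCells L ((s + L) + L * r))) := by
  rw [show h + 2 = (h+1) + 1 from rfl, List.range_succ_eq_map, List.map_cons, List.map_map]
  congr 1
  · simp
  · apply List.map_congr_left
    intro r _
    simp only [Function.comp, Nat.succ_eq_add_one]
    congr 2
    push_cast
    ring

lemma loopA_eq (L : Int) (hL : 0 < L) : ∀ (h : Nat) (s : Int) (acc : List String),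
    pvLoopA L h (pvCellsB L h s) acc
      = acc ++ (List.range h).map (fun (r : Nat) => PySem.Str.join "" (pvRowCells L (s + L * r)))
  | 0, s, acc => by simp [pvLoopA]
  | 1, s, acc => by
    have hcast : ((L.toNat : Int)) = L := Int.toNat_of_nonneg hL.le
    rw [pvLoopA]
    rw [if_pos (by simp [pvCellsB, length_pvRowCells, hcast])]
    simp only [pvCellsB, List.append_nil, PySem.List.slice_zero_start,
      PySem.List.slice_none_none]
    rw [popEmpty_ne _ _ (join_rowCells_ne L s hL)]
    rw [pvLoopA]
    simp [List.range_succ]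
  | (h+2), s, acc => by
    have hcast : ((L.toNat : Int)) = L := Int.toNat_of_nonneg hL.le
    have hLn : 0 < L.toNat := by omega
    have hlen : (pvCellsB L (h+2) s).length = L.toNat * (h+2) := length_pvCellsB L (h+2) s
    rw [pvLoopA]
    rw [if_neg (by rw [hlen]; push_cast; rw [hcast]; nlinarith)]
    rw [if_neg (by rw [hlen]; positivity)]
    have hslice : PySem.List.slice (pvCellsB L (h+2) s) (some 0) (some L) = pvRowCells L s := by
      rw [PySem.List.slice_zero_start, PySem.List.slice_to _ hL.le]
      show List.take L.toNat (pvRowCells L s ++ pvCellsB L (h+1) (s + L)) = _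
      exact List.take_left' (length_pvRowCells L s)
    have hdrop : (PySem.List.pyRange 0 L 1).foldl (fun cs _ => cs.tail) (pvCellsB L (h+2) s)
        = pvCellsB L (h+1) (s + L) := by
      rw [foldl_tail_drop, PySem.List.length_pyRange_one]
      show List.drop (L - 0).toNat (pvRowCells L s ++ pvCellsB L (h+1) (s + L)) = _
      have e0 : (L - 0).toNat = L.toNat := by omega
      rw [e0]
      exact List.drop_left' (length_pvRowCells L s)
    rw [hslice, hdrop]
    rw [popEmpty_ne _ _ (join_rowCells_ne L s hL)]
    rw [loopA_eq L hL (h+1) (s + L) (acc ++ [PySem.Str.join "" (pvRowCells L s)])]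
    rw [rows_shift L s h]
    simp [List.append_assoc]

lemma loopA_nil (L : Int) : ∀ n, pvLoopA L n [] [] = []
  | 0 => by simp [pvLoopA]
  | n+1 => by
    rw [pvLoopA]
    by_cases h0 : ((0:Int) = L)
    · rw [if_pos (by simp [← h0])]
      have e : pvPopEmpty ([] ++ [PySem.Str.join "" (PySem.List.slice ([] : List String) (some 0) none)]) = [] := by
        decide
      rw [e]
      exact loopA_nil L n
    · rw [if_neg (by simpa using h0)]
      simp

lemma cellules_eq (L H : Int) (hL : 0 < L) (hH : 0 < H) :
    pvCellulesHTML L H = pvCellsB L H.toNat 0 := by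
  rw [pvCellulesHTML, foldl_append_map, List.nil_append, PySem.List.pyRange_one,
    List.map_map]
  have e : (L * H - 0).toNat = L.toNat * H.toNat := by
    rw [show L * H - 0 = L * H by ring, Int.toNat_mul hL.le hH.le]
  rw [e, ← blockEq L hL.le H.toNat 0]
  apply List.map_congr_left
  intro k _
  simp [Function.comp]

-- ===== VERDICT (by name: the statement is the Claim_ definition above) =====
theorem cellulesParRangeeHTML_spec : Claim_equal_cellulesParRangeeHTML := by
  intro L H _
  unfold Spec_cellulesParRangeeHTML cellulesParRangeeHTML cellulesParRangeeHTML_alt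
  by_cases hH : H ≤ 0
  · rw [if_pos (Or.inr hH)]
    have e : H.toNat = 0 := by omega
    rw [e, pvLoopA]
  by_cases hL : L ≤ 0
  · rw [if_pos (Or.inl hL)]
    have hH' : 0 < H := by omega
    have hcells : pvCellulesHTML L H = [] := by
      rw [pvCellulesHTML, PySem.List.pyRange_one_eq_nil (by nlinarith)]
      rfl
    rw [hcells]
    exact loopA_nil L H.toNat
  · rw [not_le] at hL hH
    rw [if_neg (by omega)]
    rw [cellules_eq L H hL hH, loopA_eq L hL H.toNat 0 [], List.nil_append]
    simp only [PySem.List.pyRange_one, List.map_map, sub_zero]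
    apply List.map_congr_left
    intro r _
    simp only [Function.comp]
    congr 1
    rw [pvRowCells]
    apply List.map_congr_left
    intro c _
    simp only [Function.comp, pvCellB_eq]
    congr 1
    ring
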